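-- pv_equiv track=rewrite | github.com/wzygxr/shuati | class064_MatrixFastPowerAlgorithms/Code15_XorSequences.py | solve
-- ===== SOURCE A (Python) =====
-- MOD = 1000000007
--
-- class Matrix:
--     """
--     矩阵类
--     """
--     def __init__(self, n):
--         self.n = n
--         self.m = [[0 for _ in range(n)] for _ in range(n)]
--
--     def __mul__(self, other):
--         """
--         矩阵乘法
--         时间复杂度: O(n^3)
--         空间复杂度: O(n^2)
--         """
--         res = Matrix(self.n)
--         for i in range(self.n):
--             for j in range(self.n):
--                 for k in range(self.n):
--                     res.m[i][j] = (res.m[i][j] + self.m[i][k] * other.m[k][j]) % MOD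
--         return res
--
-- def count_bits(x):
--     """
--     计算一个数二进制表示中1的个数
--     时间复杂度: O(logx)
--     空间复杂度: O(1)
--     """
--     count = 0
--     while x > 0:
--         count += x & 1
--         x >>= 1
--     return count
--
-- def identity_matrix(n):
--     """
--     构造单位矩阵
--     时间复杂度: O(n^2)
--     空间复杂度: O(n^2)
--     """
--     res = Matrix(n)
--     for i in range(n):
--         res.m[i][i] = 1
--     return res
--
-- def matrix_power(base, exp):
--     """
--     矩阵快速幂
--     时间复杂度: O(n^3 * logk)
--     空间复杂度: O(n^2)
--     """
--     res = identity_matrix(base.n)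
--     while exp > 0:
--         if exp & 1:
--             res = res * base
--         base = base * base
--         exp >>= 1
--     return res
--
-- def solve(n, k, a):
--     """
--     求解Xor-sequences问题
--     时间复杂度: O(n^3 * logk)
--     空间复杂度: O(n^2)
--     """
--     # 特殊情况处理
--     if k == 1:
--         return n
--
--     # 构造转移矩阵
--     matrix = Matrix(n)
--     for i in range(n):
--         for j in range(n):
--             xor = a[i] ^ a[j]
--             if count_bits(xor) % 3 == 0:
--                 matrix.m[i][j] = 1
--
--     # 计算转移矩阵的k-1次幂
--     result = matrix_power(matrix, k - 1)
--
--     # 计算结果：所有元素之和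
--     sum_val = 0
--     for i in range(n):
--         for j in range(n):
--             sum_val = (sum_val + result.m[i][j]) % MOD
--
--     return sum_val
-- ===== SOURCE B (Python) =====
-- MOD = 1000000007
--
-- def popcount(x):
--     return 0 if x <= 0 else (x & 1) + popcount(x >> 1)
--
-- def flat_identity(n):
--     return [1 if i == j else 0 for i in range(n) for j in range(n)]
--
-- def flat_mul(n, A, B):
--     return [sum(A[i * n + t] * B[t * n + j] for t in range(n)) % MOD
--             for i in range(n) for j in range(n)]
--
-- def flat_pow(n, M, e):
--     """Recursive halving power over flat row-major n*n matrices."""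
--     if e <= 0:
--         return flat_identity(n)
--     H = flat_pow(n, M, e >> 1)
--     S = flat_mul(n, H, H)
--     return flat_mul(n, S, M) if e & 1 else S
--
-- def solve(n, k, a):
--     if k == 1:
--         return n
--     T = [1 if popcount(a[i] ^ a[j]) % 3 == 0 else 0
--          for i in range(n) for j in range(n)]
--     return sum(flat_pow(n, T, k - 1)) % MOD
-- ===== Notes on version B (the rewrite author's own statement) =====
-- stated objective: alternative
-- what changed: B replaces the Matrix class and iterative binary exponentiation with flat row-major 1-D lists, comprehension-built matrices, sum-then-mod products, a recursive popcount, and a recursive halving power M^e = (M^(e//2))^2 * (M if e odd); same O(n^3 log k) cost, different data structure and decomposition.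
import Mathlib
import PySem

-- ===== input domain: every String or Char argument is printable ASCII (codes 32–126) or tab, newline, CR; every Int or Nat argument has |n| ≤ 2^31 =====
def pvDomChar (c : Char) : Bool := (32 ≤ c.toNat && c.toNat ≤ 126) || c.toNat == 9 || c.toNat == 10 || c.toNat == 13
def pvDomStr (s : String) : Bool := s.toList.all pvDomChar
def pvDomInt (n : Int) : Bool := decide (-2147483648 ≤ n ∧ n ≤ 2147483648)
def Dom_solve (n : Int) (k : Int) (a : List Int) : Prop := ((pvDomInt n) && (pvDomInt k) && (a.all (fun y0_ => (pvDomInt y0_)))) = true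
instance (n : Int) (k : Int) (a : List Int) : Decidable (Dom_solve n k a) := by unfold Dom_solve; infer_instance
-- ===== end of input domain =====

-- B drops the Matrix class: flat row-major 1-D lists built by comprehensions, sum-then-mod
-- products, a recursive popcount, and a recursive halving matrix power replace A's nested-list
-- matrices, iterative bit-by-bit popcount and iterative binary exponentiation; same cost.

def modK : Int := 1000000007

-- ===== PORT A =====
-- entry access X.m[i][j]; all matrices are n×n by construction so getD never hits its default
def matE (X : List (List Int)) (i j : Nat) : Int := (X.getD i []).getD j 0

-- builds the n×n matrix whose (i,j) entry is f i j (Python fills a zero matrix cell by cell)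
def canon (nn : Nat) (f : Nat → Nat → Int) : List (List Int) :=
  (List.range nn).map fun i => (List.range nn).map fun j => f i j

-- Matrix.__mul__ : triple loop, res.m[i][j] = (res.m[i][j] + self.m[i][k]*other.m[k][j]) % MOD
def mmul (nn : Nat) (A B : List (List Int)) : List (List Int) :=
  canon nn fun i j => (List.range nn).foldl (fun acc kk => (acc + matE A i kk * matE B kk j) % modK) 0

-- identity_matrix
def ident (nn : Nat) : List (List Int) :=
  canon nn fun i j => if i = j then 1 else 0

-- count_bits: while x > 0: count += x & 1; x >>= 1
def cbLoop (count x : Int) : Int :=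
  if h : 0 < x then cbLoop (count + PySem.Int.band x 1) (x >>> (1:Nat)) else count
termination_by x.toNat
decreasing_by simp only [Int.shiftRight_eq_div_pow, pow_one]; omega

def countBits (x : Int) : Int := cbLoop 0 x

-- transition matrix of solve: m[i][j] = 1 iff popcount(a[i]^a[j]) % 3 == 0
def buildMat (nn : Nat) (a : List Int) : List (List Int) :=
  canon nn fun i j =>
    if countBits (PySem.Int.bxor (a.getD i 0) (a.getD j 0)) % 3 = 0 then 1 else 0

-- final double loop: sum_val = (sum_val + result.m[i][j]) % MOD
def sumEntries (nn : Nat) (X : List (List Int)) : Int :=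
  (List.range nn).foldl (fun s i => (List.range nn).foldl (fun s j => (s + matE X i j) % modK) s) 0

-- matrix_power: res = I; while exp > 0: if exp & 1: res = res*base; base = base*base; exp >>= 1
def powLoop (nn : Nat) (res base : List (List Int)) (exp : Int) : List (List Int) :=
  if h : 0 < exp then
    powLoop nn (if PySem.Int.band exp 1 ≠ 0 then mmul nn res base else res)
      (mmul nn base base) (exp >>> (1:Nat))
  else res
termination_by exp.toNat
decreasing_by simp only [Int.shiftRight_eq_div_pow, pow_one]; omega

def solve (n : Int) (k : Int) (a : List Int) : Int :=
  if k = 1 then n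
  else sumEntries n.toNat (powLoop n.toNat (ident n.toNat) (buildMat n.toNat a) (k - 1))

-- ===== PORT B =====
-- popcount(x) = 0 if x <= 0 else (x & 1) + popcount(x >> 1)
def pcB (x : Int) : Int :=
  if h : x ≤ 0 then 0 else PySem.Int.band x 1 + pcB (x >>> (1:Nat))
termination_by x.toNat
decreasing_by simp only [Int.shiftRight_eq_div_pow, pow_one]; omega

-- flat_identity: [1 if i == j else 0 for i in range(n) for j in range(n)]
def fident (nn : Nat) : List Int :=
  (List.range nn).flatMap fun i => (List.range nn).map fun j => if i = j then (1:Int) else 0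

-- flat_mul: [sum(A[i*n+t]*B[t*n+j] for t in range(n)) % MOD for i ... for j ...]
def fmul (nn : Nat) (A B : List Int) : List Int :=
  (List.range nn).flatMap fun i => (List.range nn).map fun j =>
    ((List.range nn).map fun t => A.getD (i*nn+t) 0 * B.getD (t*nn+j) 0).sum % modK

-- flat_pow: recursive halving power; H = flat_pow(n, M, e >> 1); S = H*H; S*M if e odd else S
def fpow (nn : Nat) (M : List Int) (e : Int) : List Int :=
  if h : e ≤ 0 then fident nn
  else
    let H := fpow nn M (e >>> (1:Nat))
    let S := fmul nn H H
    if PySem.Int.band e 1 ≠ 0 then fmul nn S M else S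
termination_by e.toNat
decreasing_by simp only [Int.shiftRight_eq_div_pow, pow_one]; omega

def solve_alt (n : Int) (k : Int) (a : List Int) : Int :=
  if k = 1 then n
  else
    (fpow n.toNat
      ((List.range n.toNat).flatMap fun i => (List.range n.toNat).map fun j =>
        if pcB (PySem.Int.bxor (a.getD i 0) (a.getD j 0)) % 3 = 0 then (1:Int) else 0)
      (k - 1)).sum % modK

-- ===== PRECONDITION & SPEC =====
-- Pre_ excludes only inputs where Python A raises IndexError: k ≠ 1 with n exceeding len(a)
def Pre_solve (n : Int) (k : Int) (a : List Int) : Prop := k = 1 ∨ n ≤ (a.length : Int)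
instance (n : Int) (k : Int) (a : List Int) : Decidable (Pre_solve n k a) := by unfold Pre_solve; infer_instance
def pvWitness_solve : Int × Int × List Int := (2, 3, [1, 2])

def Spec_solve (n : Int) (k : Int) (a : List Int) (out : Int) : Prop := out = solve_alt n k a
instance (n : Int) (k : Int) (a : List Int) (out : Int) : Decidable (Spec_solve n k a out) := by unfold Spec_solve; infer_instance

-- ===== CLAIM (what is proved, stated in full; the proofs are below) =====
def Claim_equal_solve : Prop := ∀ (n : Int) (k : Int) (a : List Int), Dom_solve n k a → Pre_solve n k a → Spec_solve n k a (solve n k a)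

-- ===== LEMMAS AND PROOFS =====

def Reduced (nn : Nat) (X : List (List Int)) : Prop :=
  X = canon nn (fun i j => matE X i j) ∧ ∀ i j, i < nn → j < nn → matE X i j % modK = matE X i j

theorem matE_canon (nn : Nat) (f : Nat → Nat → Int) {i j : Nat} (hi : i < nn) (hj : j < nn) :
    matE (canon nn f) i j = f i j := by
  simp [matE, canon, List.getD, hi, hj]

theorem canon_ext {nn : Nat} {f g : Nat → Nat → Int}
    (h : ∀ i j, i < nn → j < nn → f i j = g i j) : canon nn f = canon nn g := by
  unfold canon
  refine List.map_congr_left fun i hi => List.map_congr_left fun j hj => ?_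
  exact h i j (List.mem_range.mp hi) (List.mem_range.mp hj)

theorem foldmod (nn : Nat) (f : Nat → Int) :
    (List.range nn).foldl (fun acc kk => (acc + f kk) % modK) 0
      = (∑ kk ∈ Finset.range nn, f kk) % modK := by
  induction nn with
  | zero => simp [modK]
  | succ m ih =>
      rw [List.range_succ, List.foldl_append, Finset.sum_range_succ]
      simp only [List.foldl_cons, List.foldl_nil, ih]
      unfold modK; omega

theorem matE_mmul (nn : Nat) (A B : List (List Int)) {i j : Nat} (hi : i < nn) (hj : j < nn) :
    matE (mmul nn A B) i j = (∑ kk ∈ Finset.range nn, matE A i kk * matE B kk j) % modK := by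
  rw [mmul, matE_canon nn _ hi hj, foldmod]

theorem reduced_canon {nn : Nat} {f : Nat → Nat → Int}
    (h : ∀ i j, i < nn → j < nn → f i j % modK = f i j) : Reduced nn (canon nn f) := by
  constructor
  · exact (canon_ext fun i j hi hj => (matE_canon nn f hi hj).symm)
  · intro i j hi hj; rw [matE_canon nn f hi hj]; exact h i j hi hj

theorem reduced_ident (nn : Nat) : Reduced nn (ident nn) := by
  apply reduced_canon; intro i j _ _; split <;> decide

theorem reduced_mmul (nn : Nat) (A B : List (List Int)) : Reduced nn (mmul nn A B) := by
  apply reduced_canon; intro i j hi hj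
  rw [foldmod]; unfold modK; omega

theorem reduced_buildMat (nn : Nat) (a : List Int) : Reduced nn (buildMat nn a) := by
  apply reduced_canon; intro i j _ _; split <;> decide

-- strip the inner mod from each summand: (∑ (s k % M) * c k) % M = (∑ s k * c k) % M
theorem sum_mod_mul (s c : Nat → Int) (t : Finset Nat) :
    (∑ kk ∈ t, (s kk % modK) * c kk) % modK = (∑ kk ∈ t, s kk * c kk) % modK := by
  rw [Finset.sum_int_mod, Finset.sum_int_mod t modK (fun kk => s kk * c kk)]
  congr 1
  refine Finset.sum_congr rfl fun kk _ => ?_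
  rw [Int.mul_emod, Int.emod_emod_of_dvd _ dvd_rfl, ← Int.mul_emod]

theorem mmul_eq_canon (nn : Nat) (A B : List (List Int)) :
    mmul nn A B = canon nn fun i j => (∑ kk ∈ Finset.range nn, matE A i kk * matE B kk j) % modK := by
  unfold mmul
  exact canon_ext fun i j _ _ => foldmod nn _

theorem mmul_assoc (nn : Nat) (A B C : List (List Int)) :
    mmul nn (mmul nn A B) C = mmul nn A (mmul nn B C) := by
  rw [mmul_eq_canon nn (mmul nn A B) C, mmul_eq_canon nn A (mmul nn B C)]
  apply canon_ext
  intro i j hi hj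
  have hAB : ∀ kk ∈ Finset.range nn, matE (mmul nn A B) i kk * matE C kk j
      = ((∑ l ∈ Finset.range nn, matE A i l * matE B l kk) % modK) * matE C kk j := by
    intro kk hk
    rw [matE_mmul nn A B hi (Finset.mem_range.mp hk)]
  have hBC : ∀ kk ∈ Finset.range nn, matE A i kk * matE (mmul nn B C) kk j
      = ((∑ l ∈ Finset.range nn, matE B kk l * matE C l j) % modK) * matE A i kk := by
    intro kk hk
    rw [matE_mmul nn B C (Finset.mem_range.mp hk) hj, mul_comm]
  rw [Finset.sum_congr rfl hAB, Finset.sum_congr rfl hBC,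
      sum_mod_mul (fun kk => ∑ l ∈ Finset.range nn, matE A i l * matE B l kk)
        (fun kk => matE C kk j),
      sum_mod_mul (fun kk => ∑ l ∈ Finset.range nn, matE B kk l * matE C l j)
        (fun kk => matE A i kk)]
  congr 1
  simp only [Finset.sum_mul]
  rw [Finset.sum_comm]
  exact Finset.sum_congr rfl fun kk _ => Finset.sum_congr rfl fun l _ => by ring

theorem mmul_ident_right {nn : Nat} {X : List (List Int)} (h : Reduced nn X) :
    mmul nn X (ident nn) = X := by
  conv_rhs => rw [h.1]
  rw [mmul_eq_canon]
  apply canon_ext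
  intro i j hi hj
  have : ∀ kk ∈ Finset.range nn, matE X i kk * matE (ident nn) kk j
      = if kk = j then matE X i kk else 0 := by
    intro kk hk
    rw [ident, matE_canon nn _ (Finset.mem_range.mp hk) hj]
    split_ifs <;> simp_all
  rw [Finset.sum_congr rfl this, Finset.sum_ite_eq' (Finset.range nn) j]
  simp [Finset.mem_range.mpr hj, h.2 i j hi hj]

theorem mmul_ident_left {nn : Nat} {X : List (List Int)} (h : Reduced nn X) :
    mmul nn (ident nn) X = X := by
  conv_rhs => rw [h.1]
  rw [mmul_eq_canon]
  apply canon_ext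
  intro i j hi hj
  have : ∀ kk ∈ Finset.range nn, matE (ident nn) i kk * matE X kk j
      = if kk = i then matE X kk j else 0 := by
    intro kk hk
    rw [ident, matE_canon nn _ hi (Finset.mem_range.mp hk)]
    by_cases hik : kk = i
    · simp [hik]
    · rw [if_neg (fun hh => hik hh.symm), if_neg hik, zero_mul]
  rw [Finset.sum_congr rfl this, Finset.sum_ite_eq' (Finset.range nn) i]
  simp [Finset.mem_range.mpr hi, h.2 i j hi hj]

-- the plain power: pw nn M e = M^e with this multiplication
def pw (nn : Nat) (M : List (List Int)) : Nat → List (List Int)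
  | 0 => ident nn
  | e + 1 => mmul nn (pw nn M e) M

theorem reduced_pw (nn : Nat) (M : List (List Int)) (e : Nat) : Reduced nn (pw nn M e) := by
  cases e with
  | zero => exact reduced_ident nn
  | succ m => exact reduced_mmul nn _ _

theorem pw_add (nn : Nat) (M : List (List Int)) (a b : Nat) :
    pw nn M (a + b) = mmul nn (pw nn M a) (pw nn M b) := by
  induction b with
  | zero =>
      rw [Nat.add_zero]
      exact (mmul_ident_right (reduced_pw nn M a)).symm
  | succ m ih => rw [← Nat.add_assoc, pw, pw, ih, mmul_assoc]

theorem pw_one {nn : Nat} {M : List (List Int)} (h : Reduced nn M) : pw nn M 1 = M := by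
  rw [pw, pw, mmul_ident_left h]

theorem pw_sq (nn : Nat) (M : List (List Int)) (h : Nat) :
    pw nn (mmul nn M M) h = pw nn M (2 * h) := by
  induction h with
  | zero => rfl
  | succ m ih =>
      have h2 : 2 * (m + 1) = 2 * m + 1 + 1 := by ring
      rw [pw, ih, h2, pw, pw, mmul_assoc]

theorem powLoop_eq_pw (nn : Nat) (m : Nat) : ∀ (e : Int) (res base : List (List Int)),
    e.toNat ≤ m → 0 ≤ e → Reduced nn res → Reduced nn base →
    powLoop nn res base e = mmul nn res (pw nn base e.toNat) := by
  induction m with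
  | zero =>
      intro e res base hm he hres hbase
      have h0 : e = 0 := by omega
      rw [powLoop, dif_neg (by omega : ¬ 0 < e), h0]
      exact (mmul_ident_right hres).symm
  | succ m ih =>
      intro e res base hm he hres hbase
      by_cases h0 : 0 < e
      · rw [powLoop, dif_pos h0]
        have hband : PySem.Int.band e 1 = e % 2 := by
          rw [PySem.Int.band_one, PySem.Int.mod_eq_emod_of_pos (by omega)]
        have hsh : e >>> (1:Nat) = e / 2 := by
          simp [Int.shiftRight_eq_div_pow]
        rw [hband, hsh]
        have hred' : Reduced nn (if e % 2 ≠ 0 then mmul nn res base else res) := by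
          split
          · exact reduced_mmul nn _ _
          · exact hres
        rw [ih (e / 2) _ (mmul nn base base) (by omega) (by omega) hred' (reduced_mmul nn base base),
            pw_sq]
        by_cases hp : e % 2 = 0
        · rw [if_neg (by omega)]
          congr 1
          congr 1
          omega
        · rw [if_pos (by omega), mmul_assoc]
          have h1 : e.toNat = 1 + 2 * (e / 2).toNat := by omega
          rw [h1, pw_add, pw_one hbase]
      · have h0' : e = 0 := by omega
        rw [powLoop, dif_neg h0, h0']
        exact (mmul_ident_right hres).symm

-- A's powLoop from the identity computes pw, for every exponent (negative → identity = pw 0)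
theorem powLoop_pw (nn : Nat) (e : Int) (base : List (List Int)) (h : Reduced nn base) :
    powLoop nn (ident nn) base e = pw nn base e.toNat := by
  by_cases he : 0 ≤ e
  · rw [powLoop_eq_pw nn e.toNat e _ base le_rfl he (reduced_ident nn) h,
        mmul_ident_left (reduced_pw nn base e.toNat)]
  · rw [powLoop, dif_neg (by omega : ¬ 0 < e)]
    have : e.toNat = 0 := by omega
    rw [this, pw]

-- ===== B-side bridges: popcount, flat representation, sums =====

theorem cbLoop_eq_aux (m : Nat) : ∀ (x c : Int), x.toNat ≤ m → cbLoop c x = c + pcB x := by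
  induction m with
  | zero =>
      intro x c hm
      rw [cbLoop, dif_neg (by omega : ¬ 0 < x), pcB, dif_pos (by omega : x ≤ 0), add_zero]
  | succ m ih =>
      intro x c hm
      by_cases hx : 0 < x
      · rw [cbLoop, dif_pos hx, pcB, dif_neg (by omega : ¬ x ≤ 0)]
        have hsh : x >>> (1:Nat) = x / 2 := by simp [Int.shiftRight_eq_div_pow]
        rw [ih (x >>> (1:Nat)) _ (by rw [hsh]; omega)]
        ring
      · rw [cbLoop, dif_neg hx, pcB, dif_pos (by omega : x ≤ 0), add_zero]

theorem countBits_eq_pcB (x : Int) : countBits x = pcB x := by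
  rw [countBits, cbLoop_eq_aux x.toNat x 0 le_rfl, zero_add]

theorem sum_map_range (nn : Nat) (f : Nat → Int) :
    ((List.range nn).map f).sum = ∑ t ∈ Finset.range nn, f t := by
  induction nn with
  | zero => simp
  | succ m ih => rw [List.range_succ, List.map_append, List.sum_append, Finset.sum_range_succ]; simp [ih]

theorem flatten_canon (nn : Nat) (f : Nat → Nat → Int) :
    (canon nn f).flatten = (List.range nn).flatMap fun i => (List.range nn).map fun j => f i j := by
  rw [canon, List.flatMap_def]

theorem flatten_getD_rows (nn : Nat) : ∀ (rows : List (List Int)) (i j : Nat),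
    (∀ r ∈ rows, r.length = nn) → i < rows.length → j < nn →
    rows.flatten.getD (i*nn+j) 0 = (rows.getD i []).getD j 0 := by
  intro rows
  induction rows with
  | nil => intro i j _ hi _; simp at hi
  | cons r rs ih =>
      intro i j hlen hi hj
      have hr : r.length = nn := hlen r (by simp)
      cases i with
      | zero =>
          rw [List.flatten_cons]
          rw [List.getD_append _ _ _ _ (by omega)]
          simp [List.getD]
      | succ i' =>
          rw [List.flatten_cons]
          have hidx : (i'+1)*nn + j = r.length + (i'*nn + j) := by rw [hr]; ring
          rw [hidx, List.getD_append_right _ _ _ _ (by omega), Nat.add_sub_cancel_left]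
          have := ih i' j (fun r' hr' => hlen r' (by simp [hr'])) (by simpa using hi) hj
          simpa [List.getD] using this

theorem flatten_getD_matE {nn : Nat} {X : List (List Int)} (h : Reduced nn X)
    {i j : Nat} (hi : i < nn) (hj : j < nn) :
    X.flatten.getD (i*nn+j) 0 = matE X i j := by
  conv_lhs => rw [h.1]
  rw [flatten_getD_rows nn _ i j ?_ ?_ hj]
  · conv_rhs => rw [h.1]
    rfl
  · intro r hr
    obtain ⟨i', _, rfl⟩ := List.mem_map.mp hr
    simp
  · simpa [canon] using hi

theorem fident_flatten (nn : Nat) : fident nn = (ident nn).flatten := by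
  rw [fident, ident, flatten_canon]

theorem fmul_flatten {nn : Nat} {X Y : List (List Int)}
    (hX : Reduced nn X) (hY : Reduced nn Y) :
    fmul nn X.flatten Y.flatten = (mmul nn X Y).flatten := by
  rw [mmul_eq_canon, flatten_canon, fmul]
  simp only [List.flatMap_def]
  congr 1
  refine List.map_congr_left fun i hi => List.map_congr_left fun j hj => ?_
  have hi' := List.mem_range.mp hi
  have hj' := List.mem_range.mp hj
  congr 1
  rw [sum_map_range]
  refine Finset.sum_congr rfl fun t ht => ?_
  have ht' := Finset.mem_range.mp ht
  rw [flatten_getD_matE hX hi' ht', flatten_getD_matE hY ht' hj']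

theorem fpow_flatten (nn : Nat) (m : Nat) : ∀ (e : Int) (X : List (List Int)),
    e.toNat ≤ m → Reduced nn X → fpow nn X.flatten e = (pw nn X e.toNat).flatten := by
  induction m with
  | zero =>
      intro e X hm hX
      rw [fpow, dif_pos (by omega : e ≤ 0)]
      have h0 : e.toNat = 0 := by omega
      rw [h0, pw, fident_flatten]
  | succ m ih =>
      intro e X hm hX
      by_cases h0 : e ≤ 0
      · rw [fpow, dif_pos h0]
        have ht : e.toNat = 0 := by omega
        rw [ht, pw, fident_flatten]
      · rw [fpow, dif_neg h0]
        have hsh : e >>> (1:Nat) = e / 2 := by simp [Int.shiftRight_eq_div_pow]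
        have hband : PySem.Int.band e 1 = e % 2 := by
          rw [PySem.Int.band_one, PySem.Int.mod_eq_emod_of_pos (by omega)]
        simp only [hsh, hband]
        rw [ih (e / 2) X (by omega) hX]
        rw [fmul_flatten (reduced_pw nn X (e / 2).toNat) (reduced_pw nn X (e / 2).toNat), ← pw_add]
        by_cases hp : e % 2 = 0
        · rw [if_neg (by omega)]
          congr 2
          omega
        · rw [if_pos (by omega)]
          rw [fmul_flatten (reduced_pw nn X ((e / 2).toNat + (e / 2).toNat)) hX]
          have h1 : e.toNat = (e / 2).toNat + (e / 2).toNat + 1 := by omega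
          rw [h1]
          rfl

-- inner loop with running mod, from a reduced state
theorem foldmodS (nn : Nat) (f : Nat → Int) (s : Int) (hs : s % modK = s) :
    (List.range nn).foldl (fun acc kk => (acc + f kk) % modK) s
      = (s + ∑ kk ∈ Finset.range nn, f kk) % modK := by
  induction nn with
  | zero => simpa using hs.symm
  | succ m ih =>
      rw [List.range_succ, List.foldl_append, Finset.sum_range_succ]
      simp only [List.foldl_cons, List.foldl_nil, ih]
      unfold modK at *; omega

theorem foldl_inner_mod (nn : Nat) (h : Nat → Nat → Int) :
    ∀ (l : List Nat) (s : Int), s % modK = s →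
    l.foldl (fun s i => (List.range nn).foldl (fun s j => (s + h i j) % modK) s) s
      = (s + (l.map fun i => ∑ j ∈ Finset.range nn, h i j).sum) % modK := by
  intro l
  induction l with
  | nil => intro s hs; simpa using hs.symm
  | cons i l' ih =>
      intro s hs
      rw [List.foldl_cons, foldmodS nn (h i) s hs, List.map_cons, List.sum_cons]
      rw [ih _ (by unfold modK at *; omega)]
      unfold modK at *; omega

theorem sumEntries_eq (nn : Nat) (X : List (List Int)) :
    sumEntries nn X = (∑ i ∈ Finset.range nn, ∑ j ∈ Finset.range nn, matE X i j) % modK := by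
  rw [sumEntries, foldl_inner_mod nn (fun i j => matE X i j) (List.range nn) 0 (by decide)]
  rw [sum_map_range nn (fun i => ∑ j ∈ Finset.range nn, matE X i j), zero_add]

theorem flatten_sum_canon (nn : Nat) (f : Nat → Nat → Int) :
    (canon nn f).flatten.sum = ∑ i ∈ Finset.range nn, ∑ j ∈ Finset.range nn, f i j := by
  rw [List.sum_flatten, canon, List.map_map]
  simp only [Function.comp_def]
  rw [sum_map_range nn fun i => ((List.range nn).map fun j => f i j).sum]
  exact Finset.sum_congr rfl fun i _ => sum_map_range nn (f i)

-- B's flat transition matrix is the flattening of A's transition matrix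
theorem build_flatten (nn : Nat) (a : List Int) :
    ((List.range nn).flatMap fun i => (List.range nn).map fun j =>
        if pcB (PySem.Int.bxor (a.getD i 0) (a.getD j 0)) % 3 = 0 then (1:Int) else 0)
      = (buildMat nn a).flatten := by
  rw [buildMat, flatten_canon]
  simp only [countBits_eq_pcB]

-- ===== VERDICT (by name: the statement is the Claim_ definition above) =====
theorem solve_spec : Claim_equal_solve := by
  intro n k a _ _
  unfold Spec_solve solve solve_alt
  by_cases hk : k = 1
  · simp [hk]
  · simp only [if_neg hk]
    rw [build_flatten, fpow_flatten n.toNat (k-1).toNat (k-1) _ le_rfl (reduced_buildMat n.toNat a),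
        powLoop_pw n.toNat (k-1) _ (reduced_buildMat n.toNat a),
        sumEntries_eq]
    have h := (reduced_pw n.toNat (buildMat n.toNat a) (k-1).toNat).1
    conv_rhs => rw [h, flatten_sum_canon]
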